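-- pv_equiv track=rewrite | github.com/clee421/advent-of-code | 2024/day21/old_run.py | get_min_from_list
-- ===== SOURCE A (Python) =====
-- from typing import Dict, List, Tuple
--
-- def get_min_from_list(a_list: List[str]) -> str:
--     min_length = 1000000000000
--     for a in a_list:
--         min_length = min(min_length, len(a))
--
--     for a in a_list:
--         if len(a) == min_length:
--             return a
--
--     raise Exception("this should not happen")
-- ===== SOURCE B (Python) =====
-- def get_min_from_list(a_list):
--     return min(a_list, key=len)
-- ===== Notes on version B (the rewrite author's own statement) =====
-- stated objective: idiomatic
-- what changed: Replaces A's two explicit passes (one computing the minimum length against a huge sentinel, one finding the first string of that length) with the single one-pass expression min(a_list, key=len), which keeps the first element among ties.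
-- outside the precondition, e.g. on get_min_from_list([]): A raises Exception, B raises ValueError
import Mathlib
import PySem

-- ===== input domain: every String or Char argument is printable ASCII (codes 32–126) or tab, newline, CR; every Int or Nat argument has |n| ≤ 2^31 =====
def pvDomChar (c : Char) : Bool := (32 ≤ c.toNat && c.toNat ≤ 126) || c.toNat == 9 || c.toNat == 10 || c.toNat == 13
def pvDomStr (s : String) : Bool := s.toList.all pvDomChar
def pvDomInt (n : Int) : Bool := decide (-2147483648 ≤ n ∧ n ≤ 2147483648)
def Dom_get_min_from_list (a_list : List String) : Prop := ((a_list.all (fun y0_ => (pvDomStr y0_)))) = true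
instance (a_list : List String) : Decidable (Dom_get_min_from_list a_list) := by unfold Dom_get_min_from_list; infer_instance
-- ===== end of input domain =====

-- B replaces A's two explicit passes by a single first-min scan (min with key=len); objective: idiomatic.


-- ===== PORT A =====
-- A's second loop: return the first string whose length equals m (none = A's `raise`).
def pvScanA (m : Int) : List String → Option String
  | [] => none
  | a :: rest => if PySem.Str.len a = m then some a else pvScanA m rest

def get_min_from_list (a_list : List String) : String :=
  let min_length : Int := 1000000000000
  let m := a_list.foldl (fun acc a => min acc (PySem.Str.len a)) min_length
  -- `.getD ""` stands for A's unreachable `raise` (excluded by Pre_)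
  (pvScanA m a_list).getD ""

-- ===== PORT B =====
def get_min_from_list_alt (a_list : List String) : String :=
  -- min(a_list, key=len); `.getD ""` stands for min's ValueError on [] (excluded by Pre_)
  (PySem.List.min? a_list PySem.Str.len).getD ""

-- ===== PRECONDITION & SPEC =====
-- Pre_ is exactly where A returns: on [] A raises its own Exception (and B's min raises
-- ValueError); if every string were longer than 10^12 (A's sentinel) A's second loop
-- would also fall through to the raise.
def Pre_get_min_from_list (a_list : List String) : Prop :=
  ∃ a ∈ a_list, PySem.Str.len a ≤ 1000000000000
instance (a_list : List String) : Decidable (Pre_get_min_from_list a_list) := by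
  unfold Pre_get_min_from_list; infer_instance
def pvWitness_get_min_from_list : List String := ["ab", "c", "d"]
def Spec_get_min_from_list (a_list : List String) (out : String) : Prop := out = get_min_from_list_alt a_list
instance (a_list : List String) (out : String) : Decidable (Spec_get_min_from_list a_list out) := by unfold Spec_get_min_from_list; infer_instance

-- ===== CLAIM (what is proved, stated in full; the proofs are below) =====
def Claim_equal_get_min_from_list : Prop := ∀ (a_list : List String), Dom_get_min_from_list a_list → Pre_get_min_from_list a_list → Spec_get_min_from_list a_list (get_min_from_list a_list)

-- ===== LEMMAS AND PROOFS =====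

-- abbreviations used only by the proofs
def pvFM (init : Int) (xs : List String) : Int :=
  xs.foldl (fun acc a => min acc (PySem.Str.len a)) init

lemma pvFM_le_init (xs : List String) : ∀ init, pvFM init xs ≤ init := by
  induction xs with
  | nil => intro init; simp [pvFM]
  | cons a t ih =>
    intro init
    have := ih (min init (PySem.Str.len a))
    simp only [pvFM, List.foldl_cons] at *
    omega

lemma pvFM_le_mem (xs : List String) : ∀ init, ∀ y ∈ xs, pvFM init xs ≤ PySem.Str.len y := by
  induction xs with
  | nil => intro init y hy; simp at hy
  | cons a t ih =>
    intro init y hy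
    simp only [List.mem_cons] at hy
    have h1 := pvFM_le_init t (min init (PySem.Str.len a))
    rcases hy with rfl | hy
    · simp only [pvFM, List.foldl_cons] at *; omega
    · have := ih (min init (PySem.Str.len a)) y hy
      simpa [pvFM] using this

lemma pvFM_achieve (xs : List String) :
    ∀ init, pvFM init xs = init ∨ ∃ y ∈ xs, pvFM init xs = PySem.Str.len y := by
  induction xs with
  | nil => intro init; left; simp [pvFM]
  | cons a t ih =>
    intro init
    rcases ih (min init (PySem.Str.len a)) with h | ⟨y, hy, h⟩
    · simp only [pvFM, List.foldl_cons] at *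
      rcases le_or_gt init (PySem.Str.len a) with hle | hlt
      · left; omega
      · right; exact ⟨a, by simp, by omega⟩
    · right
      exact ⟨y, by simp [hy], by simpa [pvFM] using h⟩

-- proof-only helpers: the first-min fold step and one combination step
def pvStep (acc : Option String) (x : String) : Option String :=
  match acc with
  | none => some x
  | some m => if PySem.Str.len x < PySem.Str.len m then some x else some m

def pvComb (o : Option String) (m : String) : Option String :=
  match o with
  | none => some m
  | some m' => if PySem.Str.len m' < PySem.Str.len m then some m' else some m

lemma pvMin_eq (t : List String) :
    PySem.List.min? t PySem.Str.len = List.foldl pvStep none t := by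
  simp only [PySem.List.min?]
  congr 1
  funext acc x
  cases acc <;> rfl

-- the first-min fold from a `some` seed, characterised (first element wins ties)
lemma pvMinFoldl (t : List String) :
    ∀ m : String,
      List.foldl pvStep (some m) t = pvComb (List.foldl pvStep none t) m := by
  induction t with
  | nil => intro m; simp [pvComb]
  | cons x t ih =>
    intro m
    have hnone : List.foldl pvStep none (x :: t) = List.foldl pvStep (some x) t := by
      rw [List.foldl_cons]
      rfl
    rw [List.foldl_cons, hnone]
    have hseed : pvStep (some m) x
        = if PySem.Str.len x < PySem.Str.len m then some x else some m := rfl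
    by_cases hxm : PySem.Str.len x < PySem.Str.len m
    · rw [hseed, if_pos hxm, ih x]
      cases h' : List.foldl pvStep none t with
      | none => simp only [pvComb]; rw [if_pos hxm]
      | some m' =>
        simp only [pvComb]
        by_cases h1 : PySem.Str.len m' < PySem.Str.len x
        · rw [if_pos h1]
          simp only [pvComb]
          rw [if_pos (by omega)]
        · rw [if_neg h1]
          simp only [pvComb]
          rw [if_pos hxm]
    · rw [hseed, if_neg hxm, ih m, ih x]
      cases h' : List.foldl pvStep none t with
      | none => simp only [pvComb]; rw [if_neg hxm]
      | some m' =>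
        simp only [pvComb]
        by_cases h1 : PySem.Str.len m' < PySem.Str.len x
        · rw [if_pos h1]
        · rw [if_neg h1]
          simp only [pvComb]
          rw [if_neg hxm, if_neg (by omega)]

-- main lemma: A's (compute-min, find-first) equals B's single first-min scan
lemma pvMain (xs : List String) :
    ∀ init, (∃ y ∈ xs, PySem.Str.len y ≤ init) →
      pvScanA (pvFM init xs) xs = PySem.List.min? xs PySem.Str.len := by
  induction xs with
  | nil => intro init h; simp at h
  | cons a t ih =>
    intro init H
    have hm : pvFM init (a :: t) = pvFM (min init (PySem.Str.len a)) t := by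
      simp [pvFM]
    set m := pvFM init (a :: t) with hmdef
    have hma : m ≤ PySem.Str.len a := pvFM_le_mem _ init a (by simp)
    have hmin_cons : PySem.List.min? (a :: t) PySem.Str.len
        = pvComb (PySem.List.min? t PySem.Str.len) a := by
      rw [pvMin_eq, pvMin_eq, List.foldl_cons]
      exact pvMinFoldl t a
    by_cases heq : PySem.Str.len a = m
    · -- a is a first minimum: every element of t has length ≥ m
      have hbound : ∀ y ∈ t, m ≤ PySem.Str.len y := fun y hy =>
        pvFM_le_mem _ init y (by simp [hy])
      have hscan : pvScanA m (a :: t) = some a := by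
        conv_lhs => rw [pvScanA]
        rw [if_pos heq]
      rw [hscan, hmin_cons]
      cases h' : PySem.List.min? t PySem.Str.len with
      | none => simp [pvComb]
      | some m' =>
        have hge : m ≤ PySem.Str.len m' := hbound m' (PySem.List.min?_mem h')
        simp only [pvComb]
        rw [if_neg (by omega)]
    · have hlt : m < PySem.Str.len a := lt_of_le_of_ne hma (fun h => heq h.symm)
      -- the minimum is achieved in t
      have hach : ∃ z ∈ t, PySem.Str.len z = m := by
        rcases pvFM_achieve t (min init (PySem.Str.len a)) with h | ⟨y, hy, h⟩
        · rcases H with ⟨y, hy, hyle⟩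
          have hylb : m ≤ PySem.Str.len y := pvFM_le_mem _ init y hy
          have hminit : m = init := by rw [hm] at hmdef ⊢; omega
          rcases List.mem_cons.mp hy with rfl | hy'
          · omega
          · exact ⟨y, hy', by omega⟩
        · exact ⟨y, hy, by rw [hm]; exact h.symm⟩
      rcases hach with ⟨z, hz, hzlen⟩
      have H' : ∃ y ∈ t, PySem.Str.len y ≤ min init (PySem.Str.len a) := ⟨z, hz, by
        have := pvFM_le_init t (min init (PySem.Str.len a))
        rw [hm] at hzlen
        omega⟩
      have iht := ih (min init (PySem.Str.len a)) H'
      rw [← hm] at iht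
      have hscan : pvScanA m (a :: t) = pvScanA m t := by
        conv_lhs => rw [pvScanA]
        rw [if_neg heq]
      rw [hscan, iht, hmin_cons]
      cases h' : PySem.List.min? t PySem.Str.len with
      | none =>
        rw [PySem.List.min?_eq_none_iff] at h'
        subst h'; simp at hz
      | some m' =>
        have hub : PySem.Str.len m' ≤ PySem.Str.len z := PySem.List.min?_isMin h' z hz
        simp only [pvComb]
        rw [if_pos (by omega)]

-- ===== VERDICT (by name: the statement is the Claim_ definition above) =====
theorem get_min_from_list_spec : Claim_equal_get_min_from_list := by
  intro a_list _ hpre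
  unfold Spec_get_min_from_list get_min_from_list get_min_from_list_alt
  have h := pvMain a_list 1000000000000 hpre
  simp only [pvFM] at h
  dsimp only
  rw [h]
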